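-- pv_equiv track=rewrite | github.com/elifesciences/peerscout | peerscout/preprocessing/import_utils.py | _hack_split_and_fix_double_quote_encoding_issue_in_line
-- ===== SOURCE A (Python) =====
-- def _hack_double_quote_workaround_find_next_true_quote_end(line, start):
--   quote_index = line.find('"', start)
--   if quote_index >= 0 and quote_index + 1 < len(line) and line[quote_index + 1] != ',':
--     inner_quote_index = line.find('"', quote_index + 1)
--     if inner_quote_index < 0:
--       return -1
--     return _hack_double_quote_workaround_find_next_true_quote_end(line, inner_quote_index + 1)
--   return quote_index
--
-- def _hack_split_and_fix_double_quote_encoding_issue_in_line(line):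
--   current_start = 0
--   while current_start < len(line):
--     if line[current_start] == '"':
--       quote_index = _hack_double_quote_workaround_find_next_true_quote_end(line, current_start + 1)
--       if quote_index > 0:
--         yield '"%s"' % line[current_start + 1:quote_index].replace('"', '""')
--         current_start = quote_index + 1
--         if current_start < len(line) and line[current_start] == ',':
--           current_start += 1
--       else:
--         yield '"%s"' % line[current_start + 1:].replace('"', '""')
--         return
--     else:
--       sep_index = line.find(',', current_start)
--       if sep_index >= 0:
--         yield line[current_start:sep_index]
--         current_start = sep_index + 1
--       else:
--         yield line[current_start:]
--         return
-- ===== SOURCE B (Python) =====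
-- def _hack_split_and_fix_double_quote_encoding_issue_in_line(line):
--   # single forward character scan with an explicit pending-pair state machine,
--   # instead of recursive find()-based true-quote-end search + slice/replace
--   n = len(line)
--   i = 0
--   while i < n:
--     if line[i] == '"':
--       pieces = []
--       pending = False
--       end = -1
--       j = i + 1
--       while j < n:
--         c = line[j]
--         if c == '"':
--           if pending:
--             pending = False
--             pieces.append('""')
--           elif j + 1 < n and line[j + 1] != ',':
--             pending = True
--             pieces.append('""')
--           else:
--             end = j
--             break
--         else:
--           pieces.append(c)
--         j += 1
--       yield '"%s"' % ''.join(pieces)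
--       if end < 0:
--         return
--       i = end + 1
--       if i < n and line[i] == ',':
--         i += 1
--     else:
--       j = i
--       while j < n and line[j] != ',':
--         j += 1
--       yield line[i:j]
--       if j == n:
--         return
--       i = j + 1
-- ===== Notes on version B (the rewrite author's own statement) =====
-- stated objective: alternative
-- what changed: Replaces A's recursive find()-based true-quote-end helper plus slice/replace post-processing with a single inlined forward character scan that tracks an explicit pending-embedded-quote-pair state and accumulates the doubled field text as it goes.
import Mathlib
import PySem

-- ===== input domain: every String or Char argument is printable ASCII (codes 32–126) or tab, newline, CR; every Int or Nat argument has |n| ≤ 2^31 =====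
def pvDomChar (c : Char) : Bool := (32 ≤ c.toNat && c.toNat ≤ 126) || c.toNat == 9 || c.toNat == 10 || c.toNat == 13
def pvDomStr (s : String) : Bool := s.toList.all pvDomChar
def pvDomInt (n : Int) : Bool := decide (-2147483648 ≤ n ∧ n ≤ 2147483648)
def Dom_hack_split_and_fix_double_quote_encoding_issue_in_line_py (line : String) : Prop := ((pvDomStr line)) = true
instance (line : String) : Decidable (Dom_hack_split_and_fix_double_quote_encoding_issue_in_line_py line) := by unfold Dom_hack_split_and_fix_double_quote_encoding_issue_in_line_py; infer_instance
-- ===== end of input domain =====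

-- B replaces A's recursive find()-based true-quote-end search (with slice+replace) by a single
-- forward character scan with an explicit pending-pair state machine; objective: alternative.

-- ===== PORT A =====
-- _hack_double_quote_workaround_find_next_true_quote_end; fuel only guards totality
-- (each recursive call strictly advances the start index, so length+1 fuel is never exhausted)
def pvFindTrueEnd (cs : List Char) (start : Int) : Nat → Int
  | 0 => -1
  | fuel+1 =>
    let q := PySem.Chars.findFrom cs ['"'] start
    if 0 ≤ q ∧ q + 1 < (cs.length : Int) ∧ PySem.List.pyGet? cs (q + 1) ≠ some ',' then
      let inner := PySem.Chars.findFrom cs ['"'] (q + 1)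
      if inner < 0 then -1
      else pvFindTrueEnd cs (inner + 1) fuel
    else q

-- the generator's while loop; fuel only guards totality (current_start strictly increases)
def pvGoA (cs : List Char) (i : Nat) : Nat → List String
  | 0 => []
  | fuel+1 =>
    if i < cs.length then
      if PySem.List.pyGet? cs (i : Int) = some '"' then
        let e := pvFindTrueEnd cs ((i : Int) + 1) (cs.length + 1)
        if 0 < e then
          let field := String.ofList ('"' :: PySem.Chars.replace (PySem.List.slice cs (some ((i : Int) + 1)) (some e)) ['"'] ['"', '"'] ++ ['"'])
          let i' := e.toNat + 1
          if i' < cs.length ∧ PySem.List.pyGet? cs (i' : Int) = some ',' then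
            field :: pvGoA cs (i' + 1) fuel
          else
            field :: pvGoA cs i' fuel
        else
          [String.ofList ('"' :: PySem.Chars.replace (PySem.List.slice cs (some ((i : Int) + 1)) none) ['"'] ['"', '"'] ++ ['"'])]
      else
        let s := PySem.Chars.findFrom cs [','] (i : Int)
        if 0 ≤ s then
          String.ofList (PySem.List.slice cs (some (i : Int)) (some s)) :: pvGoA cs (s.toNat + 1) fuel
        else
          [String.ofList (PySem.List.slice cs (some (i : Int)) none)]
    else []

def hack_split_and_fix_double_quote_encoding_issue_in_line_py (line : String) : List String :=
  pvGoA line.toList 0 (line.toList.length + 1)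

-- ===== PORT B =====
-- inner quoted-field scan: returns (doubled pieces so far, index of the true closing quote or -1)
def pvScanQ (cs : List Char) (j : Nat) (pending : Bool) (pieces : List Char) : List Char × Int :=
  if h : j < cs.length then
    if cs[j] = '"' then
      if pending then pvScanQ cs (j + 1) false (pieces ++ ['"', '"'])
      else if j + 1 < cs.length ∧ cs[j + 1]? ≠ some ',' then pvScanQ cs (j + 1) true (pieces ++ ['"', '"'])
      else (pieces, (j : Int))
    else pvScanQ cs (j + 1) pending (pieces ++ [cs[j]])
  else (pieces, -1)
termination_by cs.length - j

-- inner unquoted-field scan: first index ≥ j holding ',' (or the length)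
def pvScanC (cs : List Char) (j : Nat) : Nat :=
  if h : j < cs.length then
    if cs[j] = ',' then j else pvScanC cs (j + 1)
  else j
termination_by cs.length - j

-- the outer while loop of B; fuel only guards totality (i strictly increases)
def pvGoB (cs : List Char) (i : Nat) : Nat → List String
  | 0 => []
  | fuel+1 =>
    if i < cs.length then
      if PySem.List.pyGet? cs (i : Int) = some '"' then
        let r := pvScanQ cs (i + 1) false []
        let field := String.ofList ('"' :: r.1 ++ ['"'])
        if r.2 < 0 then [field]
        else
          let i' := r.2.toNat + 1
          if i' < cs.length ∧ PySem.List.pyGet? cs (i' : Int) = some ',' then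
            field :: pvGoB cs (i' + 1) fuel
          else
            field :: pvGoB cs i' fuel
      else
        let j := pvScanC cs i
        let field := String.ofList ((cs.drop i).take (j - i))
        if j = cs.length then [field]
        else field :: pvGoB cs (j + 1) fuel
    else []

def hack_split_and_fix_double_quote_encoding_issue_in_line_py_alt (line : String) : List String :=
  pvGoB line.toList 0 (line.toList.length + 1)

-- ===== PRECONDITION & SPEC =====
def Spec_hack_split_and_fix_double_quote_encoding_issue_in_line_py (line : String) (out : List String) : Prop := out = hack_split_and_fix_double_quote_encoding_issue_in_line_py_alt line
instance (line : String) (out : List String) : Decidable (Spec_hack_split_and_fix_double_quote_encoding_issue_in_line_py line out) := by unfold Spec_hack_split_and_fix_double_quote_encoding_issue_in_line_py; infer_instance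

-- ===== CLAIM (what is proved, stated in full; the proofs are below) =====
def Claim_equal_hack_split_and_fix_double_quote_encoding_issue_in_line_py : Prop := ∀ (line : String), Dom_hack_split_and_fix_double_quote_encoding_issue_in_line_py line → Spec_hack_split_and_fix_double_quote_encoding_issue_in_line_py line (hack_split_and_fix_double_quote_encoding_issue_in_line_py line)

-- ===== LEMMAS AND PROOFS =====

-- each '"' becomes '""': what A's .replace('"','""') does, and what B accumulates char by char
def pvDoubled (l : List Char) : List Char := l.flatMap (fun c => if c = '"' then ['"', '"'] else [c])

theorem pvDoubled_append (a b : List Char) : pvDoubled (a ++ b) = pvDoubled a ++ pvDoubled b := by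
  simp [pvDoubled]

theorem pvDoubled_no_quote (l : List Char) (h : ∀ c ∈ l, c ≠ '"') : pvDoubled l = l := by
  induction l with
  | nil => rfl
  | cons c t ih =>
    have hc : c ≠ '"' := h c (by simp)
    have ht : pvDoubled t = t := ih (fun x hx => h x (by simp [hx]))
    simp [pvDoubled, List.flatMap_cons, hc] at ht ⊢
    exact ht

theorem pv_single_prefix_drop (l : List Char) (q : Char) (t : Nat) :
    ([q] <+: l.drop t) ↔ l[t]? = some q := by
  rw [← List.head?_drop]
  cases h : (l.drop t) with
  | nil => simp
  | cons a as => simp [List.prefix_cons_iff, eq_comm]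

theorem pv_singleton_infix_iff (q : Char) (l : List Char) : [q] <:+: l ↔ q ∈ l := by
  constructor
  · rintro ⟨s, t, rfl⟩; simp
  · intro hm
    obtain ⟨s, t, rfl⟩ := List.append_of_mem hm
    exact ⟨s, t, by simp⟩

-- characterisation of str.find(q, j) for a single-character needle
theorem pvFindFrom_char (cs : List Char) (q : Char) (j : Nat) (hj : j ≤ cs.length) :
    (PySem.Chars.findFrom cs [q] (j : Int) = -1 ∧ ∀ t, j ≤ t → t < cs.length → cs[t]? ≠ some q)
    ∨ (∃ m : Nat, PySem.Chars.findFrom cs [q] (j : Int) = (m : Int) ∧ j ≤ m ∧ m < cs.length ∧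
        cs[m]? = some q ∧ ∀ t, j ≤ t → t < m → cs[t]? ≠ some q) := by
  by_cases h : PySem.Chars.findFrom cs [q] (j : Int) = -1
  · left
    refine ⟨h, fun t ht htl hq => ?_⟩
    rw [PySem.Chars.findFrom_natCast_eq_neg_one_iff cs [q] j hj, pv_singleton_infix_iff] at h
    apply h
    rw [List.mem_iff_getElem?]
    refine ⟨t - j, ?_⟩
    rw [List.getElem?_drop]
    rwa [Nat.add_sub_cancel' ht]
  · right
    obtain ⟨h1, h2, h3⟩ := PySem.Chars.findFrom_natCast_spec cs [q] j hj h
    set f := PySem.Chars.findFrom cs [q] (j : Int) with hf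
    have hf0 : 0 ≤ f := le_trans (by positivity) h1
    have hp : cs[f.toNat]? = some q := (pv_single_prefix_drop _ _ _).mp h2
    have hlt : f.toNat < cs.length := (List.getElem?_eq_some_iff.mp hp).1
    refine ⟨f.toNat, (Int.toNat_of_nonneg hf0).symm ▸ rfl, by omega, hlt, hp, ?_⟩
    intro t ht htf hq
    exact h3 t ht htf ((pv_single_prefix_drop cs q t).mpr hq)

theorem pvReplace_go_doubled : ∀ (l acc : List Char) (fuel : Nat), l.length ≤ fuel →
    PySem.Chars.replace.go ['"'] ['"', '"'] fuel l acc = acc.reverse ++ pvDoubled l := by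
  intro l
  induction l with
  | nil =>
    intro acc fuel _
    cases fuel <;> simp [PySem.Chars.replace.go, pvDoubled]
  | cons c t ih =>
    intro acc fuel hf
    cases fuel with
    | zero => simp at hf
    | succ f =>
      by_cases hc : c = '"'
      · subst hc
        have : (['"'] : List Char).isPrefixOf ('"' :: t) = true := by simp [List.isPrefixOf]
        have hdrop : List.drop (['"'] : List Char).length ('"' :: t) = t := by simp
        simp only [PySem.Chars.replace.go, this, if_pos, hdrop]
        rw [ih _ f (by simpa using hf)]
        simp [pvDoubled, List.flatMap_cons]
      · have : (['"'] : List Char).isPrefixOf (c :: t) = false := by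
          simp only [List.isPrefixOf, Bool.and_eq_false_iff]
          left
          exact beq_eq_false_iff_ne.mpr (fun hcc => hc hcc.symm)
        simp only [PySem.Chars.replace.go, this]
        rw [ih _ f (by simpa using hf)]
        simp [pvDoubled, List.flatMap_cons, hc]

theorem pvReplace_doubled (l : List Char) :
    PySem.Chars.replace l ['"'] ['"', '"'] = pvDoubled l := by
  have := pvReplace_go_doubled l [] l.length le_rfl
  simpa [PySem.Chars.replace] using this

-- no '"' in cs between j (incl.) and m (excl.) → none in the corresponding segment
theorem pv_no_char_seg (cs : List Char) (q : Char) (j m : Nat)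
    (h : ∀ t, j ≤ t → t < m → cs[t]? ≠ some q) :
    ∀ c ∈ (cs.drop j).take (m - j), c ≠ q := by
  intro c hc
  rw [List.mem_iff_getElem?] at hc
  obtain ⟨k, hk⟩ := hc
  rw [List.getElem?_take] at hk
  split at hk
  · rw [List.getElem?_drop] at hk
    rintro rfl
    exact h (j + k) (by omega) (by omega) hk
  · simp at hk

theorem pvScanQ_skip (cs : List Char) (j m : Nat) (p : Bool) (pieces : List Char)
    (hm : m ≤ cs.length) (hj : j ≤ m)
    (hnq : ∀ t, j ≤ t → t < m → cs[t]? ≠ some '"') :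
    pvScanQ cs j p pieces = pvScanQ cs m p (pieces ++ (cs.drop j).take (m - j)) := by
  by_cases hjm : j = m
  · subst hjm; simp
  · have hjl : j < cs.length := by omega
    have hq : cs[j] ≠ '"' := by
      have := hnq j le_rfl (by omega)
      simpa [List.getElem?_eq_getElem hjl] using this
    have hdec : (cs.drop j).take (m - j) = cs[j] :: (cs.drop (j + 1)).take (m - (j + 1)) := by
      rw [List.drop_eq_getElem_cons hjl]
      have hmj : m - j = (m - (j + 1)) + 1 := by omega
      rw [hmj, List.take_succ_cons]
    rw [pvScanQ, dif_pos hjl, if_neg hq]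
    rw [pvScanQ_skip cs (j + 1) m p (pieces ++ [cs[j]]) hm (by omega)
      (fun t ht htm => hnq t (by omega) htm), hdec]
    simp
termination_by m - j

theorem pvScanC_skip (cs : List Char) (j m : Nat)
    (hm : m ≤ cs.length) (hj : j ≤ m)
    (hnc : ∀ t, j ≤ t → t < m → cs[t]? ≠ some ',') :
    pvScanC cs j = pvScanC cs m := by
  by_cases hjm : j = m
  · subst hjm; rfl
  · have hjl : j < cs.length := by omega
    have hq : cs[j] ≠ ',' := by
      have := hnc j le_rfl (by omega)
      simpa [List.getElem?_eq_getElem hjl] using this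
    rw [pvScanC, dif_pos hjl, if_neg hq]
    exact pvScanC_skip cs (j + 1) m hm (by omega) (fun t ht htm => hnc t (by omega) htm)
termination_by m - j

theorem pv_drop_decomp (cs : List Char) (j m : Nat) (hj : j ≤ m) (hm : m < cs.length) :
    cs.drop j = (cs.drop j).take (m - j) ++ cs[m] :: cs.drop (m + 1) := by
  conv_lhs => rw [← List.take_append_drop (m - j) (cs.drop j)]
  congr 1
  rw [List.drop_drop]
  have h1 : j + (m - j) = m := by omega
  rw [h1, List.drop_eq_getElem_cons hm]

theorem pv_take_split (cs : List Char) (j a b : Nat) (hja : j ≤ a) (hab : a ≤ b) :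
    (cs.drop j).take (b - j) = (cs.drop j).take (a - j) ++ (cs.drop a).take (b - a) := by
  have h1 : b - j = (a - j) + (b - a) := by omega
  rw [h1, List.take_add, List.drop_drop]
  have h2 : j + (a - j) = a := by omega
  rw [h2]

theorem pvScanC_at_comma (cs : List Char) (m : Nat) (hm : m < cs.length)
    (hc : cs[m]? = some ',') : pvScanC cs m = m := by
  rw [pvScanC, dif_pos hm, if_pos]
  rwa [List.getElem?_eq_getElem hm, Option.some_inj] at hc

theorem pvScanC_at_len (cs : List Char) : pvScanC cs cs.length = cs.length := by
  rw [pvScanC]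
  simp

theorem pvDoubled_nil : pvDoubled [] = [] := rfl

theorem pvDoubled_cons (c : Char) (l : List Char) :
    pvDoubled (c :: l) = (if c = '"' then ['"', '"'] else [c]) ++ pvDoubled l := by
  simp [pvDoubled, List.flatMap_cons]

theorem pv_drop_split (cs : List Char) (j a : Nat) (hja : j ≤ a) :
    cs.drop j = (cs.drop j).take (a - j) ++ cs.drop a := by
  conv_lhs => rw [← List.take_append_drop (a - j) (cs.drop j)]
  congr 1
  rw [List.drop_drop]
  congr 1
  omega

-- the key bridge: A's recursive true-quote-end search versus B's pending-pair scan
theorem pvBridgeQ (cs : List Char) (j : Nat) (pieces : List Char) (fuel : Nat)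
    (hj : j ≤ cs.length) (hf : cs.length + 1 - j ≤ fuel) :
    (pvFindTrueEnd cs (j : Int) fuel = -1 ∧
       pvScanQ cs j false pieces = (pieces ++ pvDoubled (cs.drop j), -1))
    ∨ (∃ m : Nat, pvFindTrueEnd cs (j : Int) fuel = (m : Int) ∧ j ≤ m ∧ m < cs.length ∧
       pvScanQ cs j false pieces = (pieces ++ pvDoubled ((cs.drop j).take (m - j)), (m : Int))) := by
  cases fuel with
  | zero => omega
  | succ f =>
  rw [pvFindTrueEnd]
  rcases pvFindFrom_char cs '"' j hj with ⟨hq, hnq⟩ | ⟨m, hq, hjm, hml, hqAt, hmin⟩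
  · -- no quote at all from j on
    left
    rw [hq]
    refine ⟨by norm_num, ?_⟩
    rw [pvScanQ_skip cs j cs.length false pieces le_rfl hj hnq, pvScanQ]
    have htk : (cs.drop j).take (cs.length - j) = cs.drop j := by
      apply List.take_of_length_le
      simp
    have hnq' : pvDoubled (cs.drop j) = cs.drop j := by
      apply pvDoubled_no_quote
      have := pv_no_char_seg cs '"' j cs.length hnq
      rwa [htk] at this
    simp [htk, hnq']
  · -- first quote at m
    have hgm : cs[m] = '"' := by rwa [List.getElem?_eq_getElem hml, Option.some_inj] at hqAt
    have hseg : ∀ c ∈ (cs.drop j).take (m - j), c ≠ '"' := pv_no_char_seg cs '"' j m hmin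
    have hsegd : pvDoubled ((cs.drop j).take (m - j)) = (cs.drop j).take (m - j) :=
      pvDoubled_no_quote _ hseg
    have hskip := pvScanQ_skip cs j m false pieces (by omega) hjm hmin
    by_cases hC : m + 1 < cs.length ∧ cs[m + 1]? ≠ some ','
    · -- embedded quote pair: the scan enters 'pending' state, A pairs it with the next quote
      have hcond : (0 : Int) ≤ (m : Int) ∧ (m : Int) + 1 < (cs.length : Int) ∧
          PySem.List.pyGet? cs ((m : Int) + 1) ≠ some ',' := by
        refine ⟨by positivity, by exact_mod_cast hC.1, ?_⟩
        have : ((m : Int) + 1) = ((m + 1 : Nat) : Int) := by push_cast; ring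
        rw [this, PySem.List.pyGet?_natCast]
        exact hC.2
      rw [hq, if_pos hcond]
      have hscanm : pvScanQ cs j false pieces =
          pvScanQ cs (m + 1) true (pieces ++ (cs.drop j).take (m - j) ++ ['"', '"']) := by
        rw [hskip, pvScanQ, dif_pos hml, if_pos hgm, if_neg (by simp), if_pos hC]
      have hc1 : ((m : Int) + 1) = ((m + 1 : Nat) : Int) := by push_cast; ring
      rcases pvFindFrom_char cs '"' (m + 1) (by omega) with ⟨hi, hni⟩ |
        ⟨m₂, hi, hm2ge, hm2lt, hq2, hmin2⟩
      · -- the pair is never closed: unterminated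
        left
        rw [hc1, hi]
        refine ⟨by norm_num, ?_⟩
        have hskip2 := pvScanQ_skip cs (m + 1) cs.length true
          (pieces ++ (cs.drop j).take (m - j) ++ ['"', '"']) le_rfl (by omega) hni
        have htk : (cs.drop (m + 1)).take (cs.length - (m + 1)) = cs.drop (m + 1) := by
          apply List.take_of_length_le; simp
        have hrest : pvDoubled (cs.drop (m + 1)) = cs.drop (m + 1) := by
          apply pvDoubled_no_quote
          have := pv_no_char_seg cs '"' (m + 1) cs.length hni
          rwa [htk] at this
        have hdj : pvDoubled (cs.drop j) =
            (cs.drop j).take (m - j) ++ ['"', '"'] ++ cs.drop (m + 1) := by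
          conv_lhs => rw [pv_drop_decomp cs j m hjm hml]
          rw [pvDoubled_append, hsegd, pvDoubled_cons, hgm, if_pos rfl, hrest]
          simp only [List.append_assoc]
        rw [hscanm, hskip2, pvScanQ]
        simp [htk, hdj, List.append_assoc]
      · -- the pair closes at m₂; A recurses from m₂+1, the scan leaves pending there
        have hgm2 : cs[m₂] = '"' := by
          rwa [List.getElem?_eq_getElem hm2lt, Option.some_inj] at hq2
        rw [hc1, hi, if_neg (by omega)]
        have hc2 : ((m₂ : Int) + 1) = ((m₂ + 1 : Nat) : Int) := by push_cast; ring
        rw [hc2]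
        -- scan side: skip to m₂, close the pair
        have hseg2 : ∀ c ∈ (cs.drop (m + 1)).take (m₂ - (m + 1)), c ≠ '"' :=
          pv_no_char_seg cs '"' (m + 1) m₂ hmin2
        have hseg2d : pvDoubled ((cs.drop (m + 1)).take (m₂ - (m + 1))) =
            (cs.drop (m + 1)).take (m₂ - (m + 1)) := pvDoubled_no_quote _ hseg2
        have hskip2 := pvScanQ_skip cs (m + 1) m₂ true
          (pieces ++ (cs.drop j).take (m - j) ++ ['"', '"']) (by omega) hm2ge hmin2
        have hscanm2 : pvScanQ cs j false pieces =
            pvScanQ cs (m₂ + 1) false (pieces ++ (cs.drop j).take (m - j) ++ ['"', '"'] ++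
              (cs.drop (m + 1)).take (m₂ - (m + 1)) ++ ['"', '"']) := by
          rw [hscanm, hskip2, pvScanQ, dif_pos hm2lt, if_pos hgm2, if_pos rfl]
        -- the accumulated pieces are exactly the doubled prefix up to m₂+1
        have hdecomp : (cs.drop j).take (m₂ + 1 - j) = (cs.drop j).take (m - j) ++
            cs[m] :: ((cs.drop (m + 1)).take (m₂ - (m + 1)) ++ [cs[m₂]]) := by
          rw [pv_take_split cs j m (m₂ + 1) hjm (by omega)]
          congr 1
          rw [List.drop_eq_getElem_cons hml]
          have h1 : m₂ + 1 - m = (m₂ - (m + 1) + 1) + 1 := by omega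
          rw [h1, List.take_succ_cons]
          congr 1
          have h2 : m₂ - (m + 1) + 1 = m₂ + 1 - (m + 1) := by omega
          rw [h2, pv_take_split cs (m + 1) m₂ (m₂ + 1) (by omega) (by omega)]
          congr 1
          rw [List.drop_eq_getElem_cons hm2lt]
          have h3 : m₂ + 1 - m₂ = 1 := by omega
          rw [h3]
          rfl
        have hP2 : pieces ++ pvDoubled ((cs.drop j).take (m₂ + 1 - j)) =
            pieces ++ (cs.drop j).take (m - j) ++ ['"', '"'] ++
            (cs.drop (m + 1)).take (m₂ - (m + 1)) ++ ['"', '"'] := by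
          rw [hdecomp]
          simp [pvDoubled_append, pvDoubled_cons, hgm, hgm2, hsegd, hseg2d, pvDoubled_nil,
            List.append_assoc]
        rw [← hP2] at hscanm2
        have hrec := pvBridgeQ cs (m₂ + 1) (pieces ++ pvDoubled ((cs.drop j).take (m₂ + 1 - j)))
          f (by omega) (by omega)
        rcases hrec with ⟨h1, h2⟩ | ⟨m₃, h1, h2, h3, h4⟩
        · left
          refine ⟨h1, ?_⟩
          rw [hscanm2, h2]
          have hdj : cs.drop j = (cs.drop j).take (m₂ + 1 - j) ++ cs.drop (m₂ + 1) :=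
            pv_drop_split cs j (m₂ + 1) (by omega)
          conv_rhs => rw [hdj, pvDoubled_append]
          simp only [List.append_assoc]
        · right
          refine ⟨m₃, h1, by omega, h3, ?_⟩
          rw [hscanm2, h4]
          conv_rhs => rw [pv_take_split cs j (m₂ + 1) m₃ (by omega) (by omega), pvDoubled_append]
          simp only [List.append_assoc]
    · -- the quote at m is the true end (followed by ',' or at end of line)
      right
      have hcond : ¬ ((0 : Int) ≤ (m : Int) ∧ (m : Int) + 1 < (cs.length : Int) ∧
          PySem.List.pyGet? cs ((m : Int) + 1) ≠ some ',') := by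
        intro ⟨_, h2, h3⟩
        apply hC
        refine ⟨by exact_mod_cast h2, ?_⟩
        have hc1 : ((m : Int) + 1) = ((m + 1 : Nat) : Int) := by push_cast; ring
        rw [hc1, PySem.List.pyGet?_natCast] at h3
        exact h3
      rw [hq, if_neg hcond]
      refine ⟨m, rfl, hjm, hml, ?_⟩
      rw [hskip, pvScanQ, dif_pos hml, if_pos hgm, if_neg (by simp), if_neg hC, hsegd]
termination_by cs.length - j

theorem pvMainEq (cs : List Char) (i : Nat) (fa fb : Nat)
    (hi : i ≤ cs.length) (ha : cs.length - i < fa) (hb : cs.length - i < fb) :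
    pvGoA cs i fa = pvGoB cs i fb := by
  cases fa with
  | zero => omega
  | succ fa =>
  cases fb with
  | zero => omega
  | succ fb =>
  rw [pvGoA, pvGoB]
  by_cases hil : i < cs.length
  case neg => simp [hil]
  rw [if_pos hil, if_pos hil]
  by_cases hquote : PySem.List.pyGet? cs (i : Int) = some '"'
  · rw [if_pos hquote, if_pos hquote]
    have hc1 : ((i : Int) + 1) = ((i + 1 : Nat) : Int) := by push_cast; ring
    rw [hc1]
    rcases pvBridgeQ cs (i + 1) [] (cs.length + 1) (by omega) (by omega) with
      ⟨h1, h2⟩ | ⟨m, h1, h2, h3, h4⟩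
    · -- unterminated quoted field: both yield the doubled rest and stop
      rw [h1]
      simp only [h2, List.nil_append]
      rw [if_neg (show ¬ ((0 : Int) < -1) by norm_num), if_pos (show (-1 : Int) < 0 by norm_num)]
      rw [PySem.List.slice_from_natCast, pvReplace_doubled]
    · -- closing quote at m
      rw [h1]
      simp only [h4, List.nil_append, Int.toNat_natCast]
      have h0m : (0 : Int) < (m : Int) := by exact_mod_cast Nat.lt_of_lt_of_le Nat.zero_lt_one (by omega)
      have hnotneg : ¬ ((m : Int) < 0) := by omega
      rw [if_pos h0m, if_neg hnotneg]
      rw [PySem.List.slice_natCast, pvReplace_doubled]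
      by_cases hcm : m + 1 < cs.length ∧ PySem.List.pyGet? cs ((m + 1 : Nat) : Int) = some ','
      · rw [if_pos hcm, if_pos hcm]
        rw [pvMainEq cs (m + 2) fa fb (by omega) (by omega) (by omega)]
      · rw [if_neg hcm, if_neg hcm]
        rw [pvMainEq cs (m + 1) fa fb (by omega) (by omega) (by omega)]
  · rw [if_neg hquote, if_neg hquote]
    rcases pvFindFrom_char cs ',' i hi with ⟨h1, h2⟩ | ⟨m, h1, h2, h3, h4, h5⟩
    · -- no comma: last unquoted field
      rw [h1, pvScanC_skip cs i cs.length le_rfl hi h2, pvScanC_at_len]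
      norm_num
      rw [List.take_of_length_le (by simp)]
    · -- comma at m
      rw [h1, pvScanC_skip cs i m (by omega) h2 h5, pvScanC_at_comma cs m h3 h4]
      have h0m : (0 : Int) ≤ (m : Int) := by positivity
      have hne : ¬ (m = cs.length) := by omega
      rw [if_pos h0m, if_neg hne]
      simp only [Int.toNat_natCast]
      rw [PySem.List.slice_natCast]
      rw [pvMainEq cs (m + 1) fa fb (by omega) (by omega) (by omega)]
termination_by cs.length - i

theorem hack_split_and_fix_double_quote_encoding_issue_in_line_py_spec : Claim_equal_hack_split_and_fix_double_quote_encoding_issue_in_line_py := by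
  intro line _
  unfold Spec_hack_split_and_fix_double_quote_encoding_issue_in_line_py
  unfold hack_split_and_fix_double_quote_encoding_issue_in_line_py
  unfold hack_split_and_fix_double_quote_encoding_issue_in_line_py_alt
  exact pvMainEq line.toList 0 _ _ (by omega) (by omega) (by omega)
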